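-- pv_equiv track=rewrite | github.com/ju-lab/LungCancer_SV_timing_analyses | Delly_annotation_scripts/04.find_BP.py | find_M_range
-- ===== SOURCE A (Python) =====
-- def make_cigartuple(cigarstring):
-- 	cg_num=len(cigarstring)
-- 	lt=''
-- 	cigar_tuple_list=[]
-- 	for n in range(0,cg_num):
-- 		try: lt = lt+str(int(cigarstring[n]))
-- 		except:
-- 			if cigarstring[n]=='M': cigar_tuple_list.append((0,int(lt)))
-- 			elif cigarstring[n]=='I': cigar_tuple_list.append((1,int(lt)))
-- 			elif cigarstring[n]=='D': cigar_tuple_list.append((2,int(lt)))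
-- 			elif cigarstring[n]=='N': cigar_tuple_list.append((3,int(lt)))
-- 			elif cigarstring[n]=='S': cigar_tuple_list.append((4,int(lt)))
-- 			elif cigarstring[n]=='H': cigar_tuple_list.append((5,int(lt)))
-- 			elif cigarstring[n]=='P': cigar_tuple_list.append((6,int(lt)))
-- 			elif cigarstring[n]=='=': cigar_tuple_list.append((7,int(lt)))
-- 			elif cigarstring[n]=='X': cigar_tuple_list.append((8,int(lt)))
-- 			elif cigarstring[n]=='B': cigar_tuple_list.append((9,int(lt)))
-- 			lt=''
-- 	return cigar_tuple_list
--
-- def find_M_range(cigar):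
-- 	m_start=0;m_end=0  # m_start: just before the start, m_end= the exact end
-- 	cigar_list=make_cigartuple(cigar)
-- 	m_count=0
-- 	for (t, n) in cigar_list:
-- 		if t == 0:
-- 			m_count +=1
--
-- 	if m_count ==1:
-- 		for (t,n) in cigar_list:
-- 			if t!=0 and t!=1:
-- 				m_start+=n
-- 			elif t==0:
-- 				m_end=m_start+n
-- 				break
-- 	elif m_count > 1:
-- 		find_m=0;m_length=0
-- 		for (t,n) in cigar_list:
-- 			if find_m==0 and t!=0 and t!=1:
-- 				m_start+=n
-- 			elif find_m >0 and t!=0 and t!=1: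
-- 				m_length+=n
-- 			elif t==0:
-- 				find_m+=1
-- 				if find_m < m_count:
-- 					m_length+=n
-- 				elif find_m == m_count:
-- 					m_end=m_start+m_length
-- 					break
-- 	return([m_start, m_end])
-- ===== SOURCE B (Python) =====
-- def make_cigartuple(cigarstring):
-- 	cg_num=len(cigarstring)
-- 	lt=''
-- 	cigar_tuple_list=[]
-- 	for n in range(0,cg_num):
-- 		try: lt = lt+str(int(cigarstring[n]))
-- 		except:
-- 			if cigarstring[n]=='M': cigar_tuple_list.append((0,int(lt)))
-- 			elif cigarstring[n]=='I': cigar_tuple_list.append((1,int(lt)))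
-- 			elif cigarstring[n]=='D': cigar_tuple_list.append((2,int(lt)))
-- 			elif cigarstring[n]=='N': cigar_tuple_list.append((3,int(lt)))
-- 			elif cigarstring[n]=='S': cigar_tuple_list.append((4,int(lt)))
-- 			elif cigarstring[n]=='H': cigar_tuple_list.append((5,int(lt)))
-- 			elif cigarstring[n]=='P': cigar_tuple_list.append((6,int(lt)))
-- 			elif cigarstring[n]=='=': cigar_tuple_list.append((7,int(lt)))
-- 			elif cigarstring[n]=='X': cigar_tuple_list.append((8,int(lt)))
-- 			elif cigarstring[n]=='B': cigar_tuple_list.append((9,int(lt)))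
-- 			lt=''
-- 	return cigar_tuple_list
--
-- def find_M_range(cigar):
-- 	cigar_list = make_cigartuple(cigar)
-- 	m_pos = [i for i, (t, _) in enumerate(cigar_list) if t == 0]
-- 	if not m_pos:
-- 		return [0, 0]
-- 	first, last = m_pos[0], m_pos[-1]
-- 	m_start = sum(n for t, n in cigar_list[:first] if t != 1)
-- 	if first == last:
-- 		m_end = m_start + cigar_list[first][1]
-- 	else:
-- 		# the reported span ends where the last M block starts
-- 		m_end = m_start + sum(n for t, n in cigar_list[first:last] if t != 1)
-- 	return [m_start, m_end]
-- ===== Notes on version B (the rewrite author's own statement) =====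
-- stated objective: simpler
-- what changed: A counts M ops and then runs one of two separate stateful scan-and-break loops; B finds the list of M-op indices once and computes m_start and m_end as non-I length sums over two slices of the parsed tuple list.
import Mathlib
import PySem

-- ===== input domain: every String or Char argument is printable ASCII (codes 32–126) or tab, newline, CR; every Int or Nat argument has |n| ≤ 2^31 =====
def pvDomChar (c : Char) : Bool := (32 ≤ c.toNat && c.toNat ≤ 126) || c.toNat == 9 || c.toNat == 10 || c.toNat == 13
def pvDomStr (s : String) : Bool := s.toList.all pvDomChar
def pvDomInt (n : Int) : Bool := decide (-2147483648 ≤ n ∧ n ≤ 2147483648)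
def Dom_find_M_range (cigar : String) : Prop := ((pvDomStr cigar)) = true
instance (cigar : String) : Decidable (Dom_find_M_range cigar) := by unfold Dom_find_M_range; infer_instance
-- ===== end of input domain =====

-- B replaces A's count-then-two-branch stateful scan loops by one index-then-sum computation
-- over the parsed cigar tuples (objective: simpler; same return value everywhere A returns).

-- ===== PORT A =====
-- shared helper: port of make_cigartuple (both Pythons call this same module-level helper);
-- none = the uncaught ValueError from int on the empty digit buffer when an op letter is not preceded by a digit.
-- 'c.isDigit' is exactly 'int(c) succeeds' for a single printable-ASCII char.
def pvOpCode (c : Char) : Option Int :=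
  if c = 'M' then some 0 else if c = 'I' then some 1 else if c = 'D' then some 2
  else if c = 'N' then some 3 else if c = 'S' then some 4 else if c = 'H' then some 5
  else if c = 'P' then some 6 else if c = '=' then some 7 else if c = 'X' then some 8
  else if c = 'B' then some 9 else none

def mkCigar : List Char → List Char → List (Int × Int) → Option (List (Int × Int))
  | [], _, acc => some acc
  | c :: rest, lt, acc =>
    if c.isDigit then mkCigar rest (lt ++ [c]) acc
    else
      match pvOpCode c with
      | some t =>
        match PySem.Int.ofChars? lt with
        | some v => mkCigar rest [] (acc ++ [(t, v)])
        | none => none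
      | none => mkCigar rest [] acc

-- the m_count == 1 loop of A (returns (m_start, m_end); breaks at the M)
def loopOne : List (Int × Int) → Int → Int → Int × Int
  | [], s, e => (s, e)
  | (t, n) :: rest, s, e =>
    if t ≠ 0 ∧ t ≠ 1 then loopOne rest (s + n) e
    else if t = 0 then (s, s + n)
    else loopOne rest s e

-- the m_count > 1 loop of A; state (m_start, m_end, find_m, m_length), breaks at the last M
def loopMany : List (Int × Int) → Int → Int → Int → Int → Int → Int × Int
  | [], s, e, _, _, _ => (s, e)
  | (t, n) :: rest, s, e, findm, mlen, mcount =>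
    if findm = 0 ∧ t ≠ 0 ∧ t ≠ 1 then loopMany rest (s + n) e findm mlen mcount
    else if findm > 0 ∧ t ≠ 0 ∧ t ≠ 1 then loopMany rest s e findm (mlen + n) mcount
    else if t = 0 then
      (if findm + 1 < mcount then loopMany rest s e (findm + 1) (mlen + n) mcount
       else if findm + 1 = mcount then (s, s + mlen)
       else loopMany rest s e (findm + 1) mlen mcount)
    else loopMany rest s e findm mlen mcount

def find_M_range (cigar : String) : List Int :=
  match mkCigar cigar.toList [] [] with
  | none => [0, 0]          -- the Python raises here; excluded by Pre_find_M_range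
  | some cl =>
    let mcount : Int := cl.foldl (fun m p => if p.1 = 0 then m + 1 else m) 0
    if mcount = 1 then
      let r := loopOne cl 0 0
      [r.1, r.2]
    else if mcount > 1 then
      let r := loopMany cl 0 0 0 0 mcount
      [r.1, r.2]
    else [0, 0]

-- ===== PORT B =====
def find_M_range_alt (cigar : String) : List Int :=
  match mkCigar cigar.toList [] [] with
  | none => [0, 0]          -- the Python raises here; excluded by Pre_find_M_range
  | some cl =>
    let mpos := ((PySem.List.enumerate cl 0).filter (fun p => p.2.1 == 0)).map (·.1)
    match mpos with
    | [] => [0, 0]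
    | first :: _ =>
      let last := mpos.getLast!
      let mstart := (((PySem.List.slice cl none (some first)).filter (fun p => p.1 != 1)).map (·.2)).sum
      let mend :=
        if first == last then
          mstart + (PySem.List.pyGetD cl first (0, 0)).2   -- cigar_list[first]; first is always in range
        else
          mstart + (((PySem.List.slice cl (some first) (some last)).filter (fun p => p.1 != 1)).map (·.2)).sum
      [mstart, mend]

-- ===== PRECONDITION & SPEC =====
-- Pre_ excludes exactly the cigars on which A raises ValueError: an op letter
-- (M I D N S H P = X B) not immediately preceded by a digit makes A call int on an empty digit buffer.
def Pre_find_M_range (cigar : String) : Prop :=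
  ∀ (i : Nat) (h : i < cigar.toList.length),
    (['M','I','D','N','S','H','P','=','X','B'].contains cigar.toList[i]) = true →
      0 < i ∧ (cigar.toList[i-1]!).isDigit = true
instance (cigar : String) : Decidable (Pre_find_M_range cigar) := by
  unfold Pre_find_M_range; infer_instance
def pvWitness_find_M_range : String := "3S5M2I4M"

def Spec_find_M_range (cigar : String) (out : List Int) : Prop := out = find_M_range_alt cigar
instance (cigar : String) (out : List Int) : Decidable (Spec_find_M_range cigar out) := by
  unfold Spec_find_M_range; infer_instance

-- ===== CLAIM (what is proved, stated in full; the proofs are below) =====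
def Claim_equal_find_M_range : Prop := ∀ (cigar : String), Dom_find_M_range cigar → Pre_find_M_range cigar → Spec_find_M_range cigar (find_M_range cigar)

-- ===== LEMMAS AND PROOFS =====

-- sum of lengths over non-I ops (the value both programs accumulate)
def ksum (l : List (Int × Int)) : Int := ((l.filter (fun p => p.1 != 1)).map (·.2)).sum

theorem ksum_nil : ksum [] = 0 := rfl

theorem ksum_cons (p : Int × Int) (l : List (Int × Int)) :
    ksum (p :: l) = (if p.1 != 1 then p.2 else 0) + ksum l := by
  by_cases h : p.1 = 1 <;> simp [ksum, h]

theorem getLastBang_concat (l : List Int) (a : Int) : (l ++ [a]).getLast! = a := by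
  cases h : l ++ [a] with
  | nil => exact absurd h (by simp)
  | cons x xs =>
    simp only [List.getLast!]
    rw [List.getLast_congr _ (by simp) h.symm]
    exact List.getLast_concat

theorem getLastBang_cons_concat (x : Int) (l : List Int) (a : Int) :
    (x :: (l ++ [a])).getLast! = a := by
  rw [← List.cons_append, getLastBang_concat]

-- A's m_count fold is the countP of M ops
theorem mcount_eq (cl : List (Int × Int)) :
    cl.foldl (fun m p => if p.1 = 0 then m + 1 else m) (0 : Int)
      = ((cl.filter (fun p => p.1 == 0)).length : Int) := by
  have := PySem.List.foldl_count_if (fun p : Int × Int => p.1 == 0) cl 0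
  simpa [List.countP_eq_length_filter] using this

-- A's single-M loop on a list whose first M op is (0, n)
theorem loopOne_eq (pre : List (Int × Int)) :
    ∀ (n : Int) (suf : List (Int × Int)) (s e : Int), (∀ y ∈ pre, y.1 ≠ 0) →
    loopOne (pre ++ (0, n) :: suf) s e = (s + ksum pre, s + ksum pre + n) := by
  induction pre with
  | nil => intro n suf s e _; simp [loopOne, ksum_nil]
  | cons q rest ih =>
    intro n suf s e hfree
    obtain ⟨t, m⟩ := q
    have ht0 : t ≠ 0 := hfree (t, m) (by simp)
    by_cases ht1 : t = 1
    · subst ht1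
      simp only [List.cons_append, loopOne]
      rw [if_neg (by simp), if_neg (by simp)]
      rw [ih n suf s e (fun y hy => hfree y (by simp [hy]))]
      simp [ksum_cons]
    · simp only [List.cons_append, loopOne]
      rw [if_pos ⟨ht0, ht1⟩]
      rw [ih n suf (s + m) e (fun y hy => hfree y (by simp [hy]))]
      simp [ksum_cons, ht1]
      omega

-- A's multi-M loop, before the first M: accumulates m_start over the prefix
theorem loopMany_phase1 (pre : List (Int × Int)) :
    ∀ (n1 : Int) (l2 : List (Int × Int)) (s e mlen mcount : Int),
    (∀ y ∈ pre, y.1 ≠ 0) → 1 < mcount →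
    loopMany (pre ++ (0, n1) :: l2) s e 0 mlen mcount
      = loopMany l2 (s + ksum pre) e 1 (mlen + n1) mcount := by
  induction pre with
  | nil =>
    intro n1 l2 s e mlen mcount _ hmc
    simp only [List.nil_append, loopMany]
    rw [if_neg (by rintro ⟨-, h0, -⟩; exact h0 rfl), if_neg (by norm_num),
      if_pos trivial, if_pos (by omega)]
    rw [ksum_nil]; norm_num
  | cons q rest ih =>
    intro n1 l2 s e mlen mcount hfree hmc
    obtain ⟨t, m⟩ := q
    have ht0 : t ≠ 0 := hfree (t, m) (by simp)
    by_cases ht1 : t = 1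
    · subst ht1
      simp only [List.cons_append, loopMany]
      rw [if_neg (by rintro ⟨-, -, h1⟩; exact h1 rfl), if_neg (by rintro ⟨-, -, h1⟩; exact h1 rfl),
        if_neg (by norm_num)]
      rw [ih n1 l2 s e mlen mcount (fun y hy => hfree y (by simp [hy])) hmc]
      simp [ksum_cons]
    · simp only [List.cons_append, loopMany]
      rw [if_pos ⟨trivial, ht0, ht1⟩]
      rw [ih n1 l2 (s + m) e mlen mcount (fun y hy => hfree y (by simp [hy])) hmc]
      have : s + m + ksum rest = s + ksum ((t, m) :: rest) := by
        rw [ksum_cons]; simp [ht1]; omega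
      rw [this]

-- A's multi-M loop, after the first M: accumulates m_length and breaks at the final M
theorem loopMany_phase2 (mid : List (Int × Int)) :
    ∀ (n2 : Int) (suf : List (Int × Int)) (s e findm mlen : Int),
    (∀ y ∈ suf, y.1 ≠ 0) → 1 ≤ findm →
    loopMany (mid ++ (0, n2) :: suf) s e findm mlen
        (findm + ((mid.filter (fun p => p.1 == 0)).length : Int) + 1)
      = (s, s + mlen + ksum mid) := by
  induction mid with
  | nil =>
    intro n2 suf s e findm mlen _ hf
    simp only [List.nil_append, loopMany, List.filter_nil, List.length_nil, Nat.cast_zero]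
    rw [if_neg (by rintro ⟨h0, -⟩; omega), if_neg (by rintro ⟨-, h0, -⟩; exact h0 rfl),
      if_pos trivial, if_neg (by omega), if_pos (by omega)]
    rw [ksum_nil]; norm_num
  | cons q rest ih =>
    intro n2 suf s e findm mlen hsuf hf
    obtain ⟨t, m⟩ := q
    by_cases ht0 : t = 0
    · subst ht0
      simp only [List.cons_append, loopMany]
      rw [if_neg (by rintro ⟨h0, -⟩; omega), if_neg (by rintro ⟨-, h0, -⟩; exact h0 rfl),
        if_pos trivial]
      rw [if_pos (by rw [List.filter_cons_of_pos (by simp), List.length_cons]; push_cast; omega)]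
      have harg : findm + ((((0, m) :: rest).filter (fun p => p.1 == 0)).length : Int) + 1
          = (findm + 1) + ((rest.filter (fun p => p.1 == 0)).length : Int) + 1 := by
        rw [List.filter_cons_of_pos (by simp), List.length_cons]; push_cast; omega
      rw [harg, ih n2 suf s e (findm + 1) (mlen + m) hsuf (by omega)]
      rw [ksum_cons]; simp; omega
    · by_cases ht1 : t = 1
      · subst ht1
        simp only [List.cons_append, loopMany]
        rw [if_neg (by rintro ⟨-, -, h1⟩; exact h1 rfl), if_neg (by rintro ⟨-, -, h1⟩; exact h1 rfl),
          if_neg (by norm_num)]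
        have harg : ((((1 : Int), m) :: rest).filter (fun p => p.1 == 0)).length
            = (rest.filter (fun p => p.1 == 0)).length := by
          rw [List.filter_cons_of_neg (by simp)]
        rw [harg, ih n2 suf s e findm mlen hsuf hf]
        rw [ksum_cons]; simp
      · simp only [List.cons_append, loopMany]
        rw [if_neg (by rintro ⟨h0, -⟩; omega), if_pos ⟨by omega, ht0, ht1⟩]
        have harg : (((t, m) :: rest).filter (fun p => p.1 == 0)).length
            = (rest.filter (fun p => p.1 == 0)).length := by
          rw [List.filter_cons_of_neg (by simp [ht0])]
        rw [harg, ih n2 suf s e findm (mlen + m) hsuf hf]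
        rw [ksum_cons]; simp [ht1]; omega

-- B's index list: the first M op of cl = pre ++ (0, n) :: rest sits at index pre.length
theorem mpos_first (pre rest : List (Int × Int)) (n : Int)
    (hpre : ∀ y ∈ pre, y.1 ≠ 0) :
    ((PySem.List.enumerate (pre ++ (0, n) :: rest) 0).filter (fun p => p.2.1 == 0)).map (·.1)
      = (pre.length : Int) ::
        ((PySem.List.enumerate rest ((pre.length : Int) + 1)).filter (fun p => p.2.1 == 0)).map (·.1) := by
  rw [PySem.List.enumerate_append, List.filter_append]
  have h1 : (PySem.List.enumerate pre 0).filter (fun p => p.2.1 == 0) = [] := by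
    rw [List.filter_eq_nil_iff]
    intro p hp
    rw [PySem.List.mem_enumerate_iff] at hp
    obtain ⟨k, hk, rfl⟩ := hp
    simpa using hpre _ (List.getElem_mem hk)
  rw [h1, PySem.List.enumerate_cons, List.filter_cons_of_pos (by simp)]
  simp

-- B's index list: the last M op of cl = front ++ (0, n) :: suf sits at index front.length
theorem mpos_last (front suf : List (Int × Int)) (n : Int)
    (hsuf : ∀ y ∈ suf, y.1 ≠ 0) :
    ((PySem.List.enumerate (front ++ (0, n) :: suf) 0).filter (fun p => p.2.1 == 0)).map (·.1)
      = (((PySem.List.enumerate front 0).filter (fun p => p.2.1 == 0)).map (·.1))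
          ++ [(front.length : Int)] := by
  rw [PySem.List.enumerate_append, List.filter_append]
  have h2 : (PySem.List.enumerate ((0, n) :: suf) (0 + front.length)).filter (fun p => p.2.1 == 0)
      = [((front.length : Int), (0, n))] := by
    rw [PySem.List.enumerate_cons, List.filter_cons_of_pos (by simp)]
    have : (PySem.List.enumerate suf (0 + front.length + 1)).filter (fun p => p.2.1 == 0) = [] := by
      rw [List.filter_eq_nil_iff]
      intro p hp
      rw [PySem.List.mem_enumerate_iff] at hp
      obtain ⟨k, hk, rfl⟩ := hp
      simpa using hsuf _ (List.getElem_mem hk)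
    rw [this]
    simp
  rw [h2]
  simp

-- last-occurrence decomposition of a list with a P-element
theorem exists_last_decomp {α : Type} (P : α → Bool) (l : List α) (h : l.filter P ≠ []) :
    ∃ mid x suf, l = mid ++ x :: suf ∧ P x = true ∧ ∀ y ∈ suf, ¬ P y = true := by
  have hrev : l.reverse.filter P ≠ [] := by
    rw [List.filter_reverse]
    simpa using h
  obtain ⟨b, bs, hb⟩ := List.exists_cons_of_ne_nil hrev
  obtain ⟨l₁, l₂, hdec, hfree, hPb, _⟩ := List.filter_eq_cons_iff.mp hb
  refine ⟨l₂.reverse, b, l₁.reverse, ?_, hPb, ?_⟩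
  · have := congrArg List.reverse hdec
    simpa using this
  · intro y hy
    exact hfree y (by simpa using hy)

-- ===== VERDICT (by name: the statement is the Claim_ definition above) =====
theorem find_M_range_spec : Claim_equal_find_M_range := by
  intro cigar _ _
  unfold Spec_find_M_range find_M_range find_M_range_alt
  cases hmk : mkCigar cigar.toList [] [] with
  | none => rfl
  | some cl =>
    simp only []
    rw [mcount_eq]
    rcases Nat.lt_or_ge (cl.filter (fun p => p.1 == 0)).length 2 with hlt | hge
    · rcases Nat.lt_or_ge (cl.filter (fun p => p.1 == 0)).length 1 with hz | ho
      · -- no M op at all: both sides [0, 0]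
        have hz0 : (cl.filter (fun p => p.1 == 0)).length = 0 := by omega
        rw [hz0]
        have hfe : cl.filter (fun p => p.1 == 0) = [] := List.length_eq_zero_iff.mp hz0
        have hmpos : ((PySem.List.enumerate cl 0).filter (fun p => p.2.1 == 0)).map (·.1) = [] := by
          rw [List.map_eq_nil_iff, List.filter_eq_nil_iff]
          intro p hp
          rw [PySem.List.mem_enumerate_iff] at hp
          obtain ⟨k, hk, rfl⟩ := hp
          have := List.filter_eq_nil_iff.mp hfe _ (List.getElem_mem hk)
          simpa using this
        rw [hmpos]
        norm_num
      · -- exactly one M op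
        have h1 : (cl.filter (fun p => p.1 == 0)).length = 1 := by omega
        obtain ⟨a, ha⟩ := List.length_eq_one_iff.mp h1
        obtain ⟨pre, suf, hdec, hpre, hPa, hsf⟩ := List.filter_eq_cons_iff.mp ha
        have hpre' : ∀ y ∈ pre, y.1 ≠ 0 := fun y hy hc => hpre y hy (by simp [hc])
        have hsuf' : ∀ y ∈ suf, y.1 ≠ 0 := fun y hy hc =>
          (List.filter_eq_nil_iff.mp hsf y hy) (by simp [hc])
        obtain ⟨ta, na⟩ := a
        have hta : ta = 0 := by simpa using hPa
        subst hta
        subst hdec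
        rw [h1, loopOne_eq pre na suf 0 0 hpre']
        rw [mpos_first pre suf na hpre']
        have hsufpos : ((PySem.List.enumerate suf ((pre.length : Int) + 1)).filter
            (fun p => p.2.1 == 0)).map (·.1) = [] := by
          rw [List.map_eq_nil_iff, List.filter_eq_nil_iff]
          intro p hp
          rw [PySem.List.mem_enumerate_iff] at hp
          obtain ⟨k, hk, rfl⟩ := hp
          simpa using hsuf' _ (List.getElem_mem hk)
        rw [hsufpos]
        simp only [List.getLast!, List.getLast_singleton, beq_self_eq_true, if_pos]
        rw [PySem.List.slice_to_natCast, List.take_left]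
        rw [PySem.List.pyGetD_natCast]
        have hget : (pre ++ (0, na) :: suf).getD pre.length ((0 : Int), (0 : Int)) = (0, na) := by
          simp [List.getD_eq_getElem?_getD]
        rw [hget]
        show _ = [ksum pre, ksum pre + na]
        norm_num
    · -- at least two M ops
      have hne : cl.filter (fun p => p.1 == 0) ≠ [] := by
        intro hc; rw [hc] at hge; simp at hge
      obtain ⟨a, as, ha⟩ := List.exists_cons_of_ne_nil hne
      obtain ⟨pre, rest, hdec, hpre, hPa, hrest⟩ := List.filter_eq_cons_iff.mp ha
      have hpre' : ∀ y ∈ pre, y.1 ≠ 0 := fun y hy hc => hpre y hy (by simp [hc])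
      obtain ⟨ta, n1⟩ := a
      have hta : ta = 0 := by simpa using hPa
      subst hta
      have hrestne : rest.filter (fun p => p.1 == 0) ≠ [] := by
        rw [hrest]
        intro hc
        rw [hc] at ha
        rw [ha] at hge
        simp at hge
      obtain ⟨mid, b, suf, hdec2, hPb, hsuf⟩ :=
        exists_last_decomp (fun p : Int × Int => p.1 == 0) rest hrestne
      obtain ⟨tb, n2⟩ := b
      have htb : tb = 0 := by simpa using hPb
      subst htb
      have hsuf' : ∀ y ∈ suf, y.1 ≠ 0 := fun y hy hc => hsuf y hy (by simp [hc])
      subst hdec2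
      subst hdec
      -- the total count splits over the decomposition
      have hcnt : ((pre ++ (0, n1) :: (mid ++ (0, n2) :: suf)).filter
          (fun p => p.1 == 0)).length
          = (mid.filter (fun p => p.1 == 0)).length + 2 := by
        rw [List.filter_append, List.filter_eq_nil_iff.mpr hpre,
          List.filter_cons_of_pos (by simp), List.filter_append,
          List.filter_cons_of_pos (by simp), List.filter_eq_nil_iff.mpr hsuf]
        simp
      rw [hcnt]
      rw [if_neg (by push_cast; omega), if_pos (by push_cast; omega)]
      -- A's loops
      have hmc : ((((mid.filter (fun p => p.1 == 0)).length + 2 : Nat)) : Int)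
          = 1 + ((mid.filter (fun p => p.1 == 0)).length : Int) + 1 := by push_cast; omega
      rw [hmc, loopMany_phase1 pre n1 (mid ++ (0, n2) :: suf) 0 0 0 _ hpre' (by omega),
        loopMany_phase2 mid n2 suf (0 + ksum pre) 0 1 (0 + n1) hsuf' (by omega)]
      -- B's index list
      rw [show pre ++ (0, n1) :: (mid ++ (0, n2) :: suf)
            = (pre ++ (0, n1) :: mid) ++ (0, n2) :: suf by simp,
        mpos_last (pre ++ (0, n1) :: mid) suf n2 hsuf']
      rw [mpos_first pre mid n1 hpre']
      simp only [List.cons_append]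
      simp only [getLastBang_cons_concat]
      have hlen : ((pre ++ (0, n1) :: mid).length : Int)
          = ((pre.length + 1 + mid.length : Nat) : Int) := by simp; omega
      rw [hlen]
      rw [if_neg (by simp; omega)]
      rw [show ((pre ++ (0, n1) :: mid) ++ (0, n2) :: suf)
            = pre ++ ((0, n1) :: (mid ++ (0, n2) :: suf)) by simp]
      rw [PySem.List.slice_to_natCast, List.take_left]
      rw [PySem.List.slice_natCast]
      rw [List.drop_left]
      have htk : pre.length + 1 + mid.length - pre.length = mid.length + 1 := by omega
      rw [htk]
      rw [show List.take (mid.length + 1) ((0, n1) :: (mid ++ (0, n2) :: suf))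
            = (0, n1) :: List.take mid.length (mid ++ (0, n2) :: suf) from rfl,
        List.take_left]
      show _ = [ksum pre, ksum pre + ksum ((0, n1) :: mid)]
      rw [ksum_cons]
      norm_num
      omega
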